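-- pv_equiv track=rewrite | github.com/siamak-p/persona_detection_agent | summarizer/summarizer_agent.py | _clamp_by_chars
-- ===== SOURCE A (Python) =====
-- from typing import Any, List, Sequence, Optional, Dict
--
-- def _clamp_by_chars(messages: Sequence[str], budget_chars: int) -> list[str]:
--     if budget_chars <= 0:
--         return list(messages)
--
--     total = 0
--     kept: list[str] = []
--     for m in reversed(messages):
--         ln = len(m)
--         if total + ln > budget_chars and kept:
--             break
--         kept.append(m)
--         total += ln
--     kept.reverse()
--     return kept
-- ===== SOURCE B (Python) =====
-- def _clamp_by_chars(messages, budget_chars):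
--     if budget_chars <= 0:
--         return list(messages)
--     total = sum(len(m) for m in messages)
--     i = 0
--     n = len(messages)
--     while i < n - 1 and total > budget_chars:
--         total -= len(messages[i])
--         i += 1
--     return list(messages[i:])
-- ===== Notes on version B (the rewrite author's own statement) =====
-- stated objective: alternative
-- what changed: B computes the grand character total once, then advances a cutoff index forward from the front while the remaining total exceeds the budget (always keeping the last message), slicing once at the end, instead of A's backward scan that builds an accumulator list and reverses it.
import Mathlib
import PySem

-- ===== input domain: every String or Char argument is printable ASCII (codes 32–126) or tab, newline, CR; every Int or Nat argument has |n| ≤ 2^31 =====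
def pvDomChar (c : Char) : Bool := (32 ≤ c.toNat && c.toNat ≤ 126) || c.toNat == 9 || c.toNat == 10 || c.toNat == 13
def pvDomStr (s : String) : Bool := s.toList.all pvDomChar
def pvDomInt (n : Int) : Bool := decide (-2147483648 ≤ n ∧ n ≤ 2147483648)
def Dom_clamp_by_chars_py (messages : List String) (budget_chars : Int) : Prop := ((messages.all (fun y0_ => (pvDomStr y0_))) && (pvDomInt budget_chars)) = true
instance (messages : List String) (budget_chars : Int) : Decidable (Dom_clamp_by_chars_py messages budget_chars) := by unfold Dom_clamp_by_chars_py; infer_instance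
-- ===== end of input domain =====

-- B trims from the front against a precomputed grand total and slices once, instead of A's backward accumulate-and-reverse (alternative decomposition, same cost).


-- ===== PORT A =====
-- A: backward scan over reversed messages, accumulating kept list, then reverse.
def aLoop (budget_chars : Int) : List String → Int → List String → List String
  | [], _, kept => kept
  | m :: rest, total, kept =>
    let ln := PySem.Str.len m
    if total + ln > budget_chars ∧ kept ≠ [] then kept
    else aLoop budget_chars rest (total + ln) (kept ++ [m])

def clamp_by_chars_py (messages : List String) (budget_chars : Int) : List String :=
  if budget_chars ≤ 0 then messages
  else (aLoop budget_chars messages.reverse 0 []).reverse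

-- ===== PORT B =====
-- B: grand total once, then trim from the front while total exceeds budget,
-- never dropping the last message; the index loop becomes recursion on the suffix.
def bLoop (budget_chars : Int) : List String → Int → List String
  | [], _ => []
  | m :: rest, total =>
    if rest ≠ [] ∧ total > budget_chars then
      bLoop budget_chars rest (total - PySem.Str.len m)
    else m :: rest

def clamp_by_chars_py_alt (messages : List String) (budget_chars : Int) : List String :=
  if budget_chars ≤ 0 then messages
  else bLoop budget_chars messages ((messages.map PySem.Str.len).sum)

-- ===== PRECONDITION & SPEC =====
def Spec_clamp_by_chars_py (messages : List String) (budget_chars : Int) (out : List String) : Prop := out = clamp_by_chars_py_alt messages budget_chars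
instance (messages : List String) (budget_chars : Int) (out : List String) : Decidable (Spec_clamp_by_chars_py messages budget_chars out) := by unfold Spec_clamp_by_chars_py; infer_instance

-- ===== CLAIM (what is proved, stated in full; the proofs are below) =====
def Claim_equal_clamp_by_chars_py : Prop := ∀ (messages : List String) (budget_chars : Int), Dom_clamp_by_chars_py messages budget_chars → Spec_clamp_by_chars_py messages budget_chars (clamp_by_chars_py messages budget_chars)

-- ===== LEMMAS AND PROOFS =====

def sumLen (l : List String) : Int := (l.map PySem.Str.len).sum

theorem strLen_nonneg (m : String) : 0 ≤ PySem.Str.len m := by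
  simp [PySem.Str.len_eq]

theorem sumLen_nonneg (l : List String) : 0 ≤ sumLen l := by
  induction l with
  | nil => simp [sumLen]
  | cons m rest ih =>
    have := strLen_nonneg m
    simp only [sumLen, List.map_cons, List.sum_cons] at *
    omega

theorem sumLen_reverse (l : List String) : sumLen l.reverse = sumLen l := by
  simp [sumLen, List.map_reverse, List.sum_reverse]

-- A's loop reaches the end unchanged when the whole remaining total fits.
theorem aLoop_all (B : Int) (l : List String) (total : Int) (kept : List String)
    (h : total + sumLen l ≤ B) : aLoop B l total kept = kept ++ l := by
  induction l generalizing total kept with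
  | nil => simp [aLoop]
  | cons m rest ih =>
    have h1 := strLen_nonneg m
    have h2 := sumLen_nonneg rest
    have hs : sumLen (m :: rest) = PySem.Str.len m + sumLen rest := by
      simp [sumLen]
    simp only [aLoop]
    rw [if_neg (by intro ⟨hc, _⟩; omega)]
    rw [ih (total + PySem.Str.len m) (kept ++ [m]) (by omega)]
    simp

-- A's loop never adds the final element when everything before it is kept
-- and the grand total overflows the budget.
theorem aLoop_drop_last (B : Int) (l : List String) (m : String) (total : Int)
    (kept : List String) (hne : l ≠ [] ∨ kept ≠ [])
    (h : total + sumLen l + PySem.Str.len m > B) :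
    aLoop B (l ++ [m]) total kept = aLoop B l total kept := by
  induction l generalizing total kept with
  | nil =>
    have hk : kept ≠ [] := hne.resolve_left (by simp)
    have h0 : sumLen ([] : List String) = 0 := by simp [sumLen]
    have hgt : total + PySem.Str.len m > B := by omega
    rw [List.nil_append]
    simp only [aLoop]
    rw [if_pos ⟨hgt, hk⟩]
  | cons x rest ih =>
    have hs : sumLen (x :: rest) = PySem.Str.len x + sumLen rest := by
      simp [sumLen]
    rw [List.cons_append]
    simp only [aLoop]
    by_cases hc : total + PySem.Str.len x > B ∧ kept ≠ []
    · rw [if_pos hc, if_pos hc]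
    · rw [if_neg hc, if_neg hc]
      exact ih (total + PySem.Str.len x) (kept ++ [x]) (Or.inr (by simp)) (by omega)

theorem core_eq (B : Int) (messages : List String) :
    (aLoop B messages.reverse 0 []).reverse = bLoop B messages (sumLen messages) := by
  induction messages with
  | nil => simp [aLoop, bLoop]
  | cons m rest ih =>
    by_cases hr : rest = []
    · subst hr
      simp only [aLoop, bLoop, List.reverse_cons, List.reverse_nil, List.nil_append]
      rw [if_neg (by simp), if_neg (by simp)]
      simp
    · have hs : sumLen (m :: rest) = PySem.Str.len m + sumLen rest := by
        simp [sumLen]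
      by_cases hb : sumLen (m :: rest) > B
      · have hrev : (m :: rest).reverse = rest.reverse ++ [m] := by simp
        have hns : rest.reverse ≠ [] := by simpa using hr
        have hsum : (0 : Int) + sumLen rest.reverse + PySem.Str.len m > B := by
          rw [sumLen_reverse]; omega
        rw [hrev, aLoop_drop_last B _ m 0 [] (Or.inl hns) hsum, ih]
        conv_rhs => rw [bLoop]
        rw [if_pos ⟨hr, hb⟩]
        congr 1
        omega
      · have h0 : (0 : Int) + sumLen ((m :: rest).reverse) ≤ B := by
          rw [sumLen_reverse]; omega
        rw [aLoop_all B _ 0 [] h0]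
        conv_rhs => rw [bLoop]
        rw [if_neg (by intro ⟨_, hc⟩; omega)]
        simp

-- ===== VERDICT (by name: the statement is the Claim_ definition above) =====
theorem clamp_by_chars_py_spec : Claim_equal_clamp_by_chars_py := by
  intro messages budget_chars _hDom
  unfold Spec_clamp_by_chars_py clamp_by_chars_py clamp_by_chars_py_alt
  by_cases hb : budget_chars ≤ 0
  · simp [hb]
  · simp only [hb, if_false]
    exact core_eq budget_chars messages
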